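-- pv_equiv track=rewrite | github.com/Pranaykumar30/Strivers-A2Z-DSA-Sheet-Python | Step 7 - Recursion [Pattern Wise]/Step 7.2 - Subsequences Pattern/4) More subsequence.py | countDistinctSubsequences
-- ===== SOURCE A (Python) =====
-- def countDistinctSubsequences(s):
--     mod = 10 ** 9 + 7
--     last = {}
--     dp = [0] * (len(s) + 1)
--     dp[0] = 1
--
--     for i, char in enumerate(s, 1):
--         dp[i] = (2 * dp[i - 1]) % mod
--
--         if char in last:
--             dp[i] = (dp[i] - dp[last[char] - 1] + mod) % mod
--
--         last[char] = i
--
--     return dp[-1] - 1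
-- ===== SOURCE B (Python) =====
-- def countDistinctSubsequences(s):
--     mod = 10 ** 9 + 7
--     # end[c] = number of distinct subsequences that end with character c (mod),
--     # counting by LAST character instead of A's prefix dp with last-occurrence subtraction:
--     # every distinct subsequence of the prefix either stays as is or is extended by c,
--     # so appending c makes all of them (plus "c" itself) end with c.
--     end = {}
--     for c in s:
--         end[c] = (sum(end.values()) + 1) % mod
--     return (sum(end.values()) + 1) % mod - 1
-- ===== Notes on version B (the rewrite author's own statement) =====
-- stated objective: alternative
-- what changed: B counts distinct subsequences partitioned by their LAST character: a dict end[c] holds how many distinct subsequences end with c and each step sets end[c] = sum(end.values()) + 1; A's dp array over prefixes, the last-occurrence index dict and the dp[last[char]-1] subtraction all disappear.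
import Mathlib
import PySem

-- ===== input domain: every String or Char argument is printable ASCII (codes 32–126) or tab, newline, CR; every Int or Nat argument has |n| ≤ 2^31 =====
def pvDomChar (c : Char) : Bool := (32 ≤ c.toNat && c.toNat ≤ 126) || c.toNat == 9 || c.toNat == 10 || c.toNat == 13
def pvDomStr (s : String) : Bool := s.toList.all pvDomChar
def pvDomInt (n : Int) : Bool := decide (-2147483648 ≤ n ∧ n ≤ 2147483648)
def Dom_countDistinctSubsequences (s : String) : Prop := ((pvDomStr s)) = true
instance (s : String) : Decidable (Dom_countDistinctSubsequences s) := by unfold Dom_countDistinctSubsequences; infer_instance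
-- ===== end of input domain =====

-- B counts distinct subsequences partitioned by their LAST character (end[c] = sum of all + 1
-- on each step) instead of A's prefix dp array with last-occurrence-index subtraction.

-- ===== PORT A =====
-- one iteration of A's loop: state = (last : char -> index, dp array), item = (i, char)
def pvStepA (st : PySem.Dict Char Int × List Int) (p : Int × Char) :
    PySem.Dict Char Int × List Int :=
  let last := st.1
  let i := p.1
  let c := p.2
  -- dp[i] = (2 * dp[i-1]) % mod
  let dp1 := PySem.List.pySetD st.2 i
      (PySem.Int.mod (2 * PySem.List.pyGetD st.2 (i - 1) 0) 1000000007)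
  -- if char in last: dp[i] = (dp[i] - dp[last[char] - 1] + mod) % mod
  let dp2 := if last.contains c then
      PySem.List.pySetD dp1 i
        (PySem.Int.mod
          (PySem.List.pyGetD dp1 i 0 - PySem.List.pyGetD dp1 (last.getD c 0 - 1) 0 + 1000000007)
          1000000007)
    else dp1
  (last.insert c i, dp2)

def countDistinctSubsequences (s : String) : Int :=
  -- dp = [0] * (len(s) + 1); dp[0] = 1
  let dp0 := PySem.List.pySetD (List.replicate (s.toList.length + 1) (0 : Int)) 0 1
  let st := (PySem.List.enumerate s.toList 1).foldl pvStepA (PySem.Dict.empty, dp0)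
  PySem.List.pyGetD st.2 (-1) 0 - 1

-- ===== PORT B =====
-- one iteration of B's loop: end[c] = (sum(end.values()) + 1) % mod
def pvStepB (d : PySem.Dict Char Int) (c : Char) : PySem.Dict Char Int :=
  d.insert c (PySem.Int.mod (d.values.sum + 1) 1000000007)

def countDistinctSubsequences_alt (s : String) : Int :=
  let d := s.toList.foldl pvStepB PySem.Dict.empty
  PySem.Int.mod (d.values.sum + 1) 1000000007 - 1

-- ===== PRECONDITION & SPEC =====
def Spec_countDistinctSubsequences (s : String) (out : Int) : Prop := out = countDistinctSubsequences_alt s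
instance (s : String) (out : Int) : Decidable (Spec_countDistinctSubsequences s out) := by unfold Spec_countDistinctSubsequences; infer_instance

-- ===== CLAIM (what is proved, stated in full; the proofs are below) =====
def Claim_equal_countDistinctSubsequences : Prop := ∀ (s : String), Dom_countDistinctSubsequences s → Spec_countDistinctSubsequences s (countDistinctSubsequences s)

-- ===== LEMMAS AND PROOFS =====

-- dp is only ever written at the current index; these two facts are what the invariant needs
theorem pv_getD_set_self (xs : List Int) (n : Nat) (v : Int) (h : n < xs.length) :
    (xs.set n v).getD n 0 = v := by
  simp [List.getD, h]

theorem pv_getD_set_ne (xs : List Int) (n m : Nat) (v : Int) (h : m ≠ n) :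
    (xs.set n v).getD m 0 = xs.getD m 0 := by
  simp [List.getD, List.getElem?_set_ne (by omega : n ≠ m)]

-- sum of the values after d[c] = v: the old value at c (0 if absent) is replaced by v
theorem pv_sum_values_insert (d : PySem.Dict Char Int) (hnd : d.keys.Nodup)
    (c : Char) (v : Int) :
    ((d.insert c v).values).sum = d.values.sum - d.getD c 0 + v := by
  by_cases hc : d.contains c = true
  · have hmem : c ∈ d.keys := (PySem.Dict.contains_iff_mem_keys d c).mp hc
    have hnd' : (d.insert c v).keys.Nodup := PySem.Dict.nodup_keys_insert d c v hnd
    rw [PySem.Dict.values_eq_map_keys (d.insert c v) hnd' 0,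
        PySem.Dict.values_eq_map_keys d hnd 0,
        PySem.Dict.keys_insert_of_contains d v hc]
    have hperm : d.keys.Perm (c :: d.keys.erase c) := List.perm_cons_erase hmem
    rw [(hperm.map (fun k => (d.insert c v).getD k 0)).sum_eq,
        (hperm.map (fun k => d.getD k 0)).sum_eq]
    simp only [List.map_cons, List.sum_cons, PySem.Dict.getD_insert_self]
    have hcong : ∀ k ∈ d.keys.erase c,
        (d.insert c v).getD k 0 = d.getD k 0 := by
      intro k hk
      have hne : k ≠ c := ((List.Nodup.mem_erase_iff hnd).mp hk).1
      exact PySem.Dict.getD_insert_of_ne d v 0 hne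
    rw [List.map_congr_left hcong]
    ring
  · have hc' : d.contains c = false := by simpa using hc
    have : (d.insert c v).values = d.values ++ [v] := by
      show ((d.insert c v).items).map (·.2) = (d.items).map (·.2) ++ [v]
      rw [PySem.Dict.items_insert_of_not_contains d v hc']
      simp
    rw [this, List.sum_append, PySem.Dict.getD_of_not_contains d 0 hc']
    simp

-- Invariant: after k characters, A's dp[k] equals (sum of B's per-character counts + 1) % mod,
-- and for every char seen, B's dict stores exactly A's dp[last[c] - 1].
theorem pv_loop (L : List Char) : ∀ (k : Nat) (dp : List Int)
    (last : PySem.Dict Char Int) (d : PySem.Dict Char Int),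
    k + L.length < dp.length →
    PySem.List.pyGetD dp (k : Int) 0 = PySem.Int.mod (d.values.sum + 1) 1000000007 →
    (∀ c, last.contains c = true → 1 ≤ last.getD c 0 ∧ last.getD c 0 ≤ (k : Int)) →
    (∀ c, d.getD c 0 =
      if last.contains c then PySem.List.pyGetD dp (last.getD c 0 - 1) 0 else 0) →
    d.keys.Nodup →
    ((PySem.List.enumerate L ((k : Int) + 1)).foldl pvStepA (last, dp)).2.length = dp.length ∧
    PySem.List.pyGetD ((PySem.List.enumerate L ((k : Int) + 1)).foldl pvStepA (last, dp)).2
        ((k + L.length : Nat) : Int) 0 =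
      PySem.Int.mod ((L.foldl pvStepB d).values.sum + 1) 1000000007 := by
  induction L with
  | nil =>
    intro k dp last d _ h2 _ _ _
    simpa using h2
  | cons c rest ih =>
    intro k dp last d h1 h2 h3 h4 h5
    rw [PySem.List.enumerate_cons]
    simp only [List.foldl_cons, List.length_cons]
    simp only [List.length_cons] at h1
    have hkdp : k + 1 < dp.length := by omega
    have hlen : k + 1 + rest.length < dp.length := by omega
    have hi : ((k : Int) + 1).toNat = k + 1 := by omega
    have hi2 : ((k + 1 : Nat) : Int) = (k : Int) + 1 := by push_cast; ring
    have hk1 : (k : Int) + 1 - 1 = (k : Int) := by ring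
    have hmod : ∀ a : Int, PySem.Int.mod a 1000000007 = a % 1000000007 :=
      fun a => PySem.Int.mod_eq_emod_of_pos (by norm_num)
    have hset : ∀ v : Int, PySem.List.pySetD dp ((k : Int) + 1) v = dp.set (k + 1) v :=
      fun v => by rw [PySem.List.pySetD_of_nonneg _ _ (by omega), hi]
    have hset2 : ∀ w v : Int,
        PySem.List.pySetD (dp.set (k + 1) w) ((k : Int) + 1) v = dp.set (k + 1) v :=
      fun w v => by rw [PySem.List.pySetD_of_nonneg _ _ (by omega), hi, List.set_set]
    have hread1 : ∀ w : Int, PySem.List.pyGetD (dp.set (k + 1) w) ((k : Int) + 1) 0 = w :=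
      fun w => by
        rw [PySem.List.pyGetD_of_nonneg _ _ (by omega), hi]
        exact pv_getD_set_self _ _ _ hkdp
    have hreadlow : ∀ (w j : Int), 0 ≤ j → j ≤ (k : Int) →
        PySem.List.pyGetD (dp.set (k + 1) w) j 0 = PySem.List.pyGetD dp j 0 :=
      fun w j hj0 hjk => by
        rw [PySem.List.pyGetD_of_nonneg _ _ hj0, PySem.List.pyGetD_of_nonneg _ _ hj0,
          pv_getD_set_ne _ _ _ _ (by omega)]
    -- the bound-preservation subgoal, shared by both branches
    have hbnd : ∀ c' : Char, (last.insert c ((k : Int) + 1)).contains c' = true →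
        1 ≤ (last.insert c ((k : Int) + 1)).getD c' 0 ∧
        (last.insert c ((k : Int) + 1)).getD c' 0 ≤ ((k + 1 : Nat) : Int) := by
      intro c' hcc
      rw [PySem.Dict.contains_insert] at hcc
      rw [PySem.Dict.getD_insert]
      by_cases hce : c' = c
      · rw [if_pos hce]
        refine ⟨by omega, by rw [hi2]⟩
      · rw [if_neg hce]
        simp [hce] at hcc
        obtain ⟨a1, a2⟩ := h3 c' hcc
        refine ⟨a1, by rw [hi2]; omega⟩
    -- the dict-correspondence subgoal for a new dp array written only at position k+1
    have hdict : ∀ (V : Int), ∀ c' : Char,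
        (d.insert c (PySem.Int.mod (d.values.sum + 1) 1000000007)).getD c' 0 =
        if (last.insert c ((k : Int) + 1)).contains c' then
          PySem.List.pyGetD (dp.set (k + 1) V)
            ((last.insert c ((k : Int) + 1)).getD c' 0 - 1) 0
        else 0 := by
      intro V c'
      rw [PySem.Dict.getD_insert, PySem.Dict.contains_insert, PySem.Dict.getD_insert]
      by_cases hce : c' = c
      · simp only [hce, if_true, beq_self_eq_true, Bool.true_or]
        rw [hk1, hreadlow _ _ (by omega) (by omega), h2]
      · have hbe : (c' == c) = false := by simp [hce]
        simp only [if_neg hce, hbe, Bool.false_or]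
        rw [h4 c']
        by_cases hcl : last.contains c' = true
        · rw [if_pos hcl, if_pos hcl]
          obtain ⟨b1, b2⟩ := h3 c' hcl
          rw [hreadlow _ _ (by omega) (by omega)]
        · rw [if_neg hcl, if_neg hcl]
    have hnd' : (d.insert c (PySem.Int.mod (d.values.sum + 1) 1000000007)).keys.Nodup :=
      PySem.Dict.nodup_keys_insert d c (PySem.Int.mod (d.values.sum + 1) 1000000007) h5
    have hsum := pv_sum_values_insert d h5 c (PySem.Int.mod (d.values.sum + 1) 1000000007)
    simp only [pvStepB]
    by_cases hc : last.contains c = true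
    · -- char already seen: A subtracts dp[last[c]-1], B replaces the old count for c
      obtain ⟨hj1, hj2⟩ := h3 c hc
      have hv := h4 c
      rw [if_pos hc] at hv
      have hstep : pvStepA (last, dp) ((k : Int) + 1, c) =
          (last.insert c ((k : Int) + 1),
           dp.set (k + 1)
             (PySem.Int.mod
               (PySem.Int.mod (2 * PySem.Int.mod (d.values.sum + 1) 1000000007) 1000000007
                 - d.getD c 0 + 1000000007) 1000000007)) := by
        simp only [pvStepA, hc, if_true]
        rw [hk1, h2, hset, hset2, hread1, hreadlow _ (last.getD c 0 - 1) (by omega) (by omega),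
          ← hv]
      rw [hstep]
      have := ih (k + 1)
        (dp.set (k + 1)
          (PySem.Int.mod
            (PySem.Int.mod (2 * PySem.Int.mod (d.values.sum + 1) 1000000007) 1000000007
              - d.getD c 0 + 1000000007) 1000000007))
        (last.insert c ((k : Int) + 1))
        (d.insert c (PySem.Int.mod (d.values.sum + 1) 1000000007))
        (by rw [List.length_set]; exact hlen)
        (by
          rw [hi2, hread1, hsum]
          simp only [hmod]
          omega)
        hbnd
        (hdict _)
        hnd'
      simp only [List.length_set] at this
      obtain ⟨w1, w2⟩ := this
      refine ⟨w1, ?_⟩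
      rw [show ((k : Int) + 1) + 1 = ((k + 1 : Nat) : Int) + 1 by rw [hi2],
        show k + (rest.length + 1) = (k + 1) + rest.length by omega]
      exact w2
    · -- first occurrence: no subtraction in A, end.get(c, 0) = 0 in B
      have hv := h4 c
      rw [if_neg hc] at hv
      have hstep : pvStepA (last, dp) ((k : Int) + 1, c) =
          (last.insert c ((k : Int) + 1),
           dp.set (k + 1)
             (PySem.Int.mod (2 * PySem.Int.mod (d.values.sum + 1) 1000000007) 1000000007)) := by
        simp only [pvStepA, hc, if_false, Bool.false_eq_true]
        rw [hk1, h2, hset]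
      rw [hstep]
      have := ih (k + 1)
        (dp.set (k + 1)
          (PySem.Int.mod (2 * PySem.Int.mod (d.values.sum + 1) 1000000007) 1000000007))
        (last.insert c ((k : Int) + 1))
        (d.insert c (PySem.Int.mod (d.values.sum + 1) 1000000007))
        (by rw [List.length_set]; exact hlen)
        (by
          rw [hi2, hread1, hsum, hv]
          simp only [hmod]
          omega)
        hbnd
        (hdict _)
        hnd'
      simp only [List.length_set] at this
      obtain ⟨w1, w2⟩ := this
      refine ⟨w1, ?_⟩
      rw [show ((k : Int) + 1) + 1 = ((k + 1 : Nat) : Int) + 1 by rw [hi2],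
        show k + (rest.length + 1) = (k + 1) + rest.length by omega]
      exact w2

-- dp[-1] on a list of length n+1 is dp[n]
theorem pv_pyGetD_neg_one (xs : List Int) (n : Nat) (hx : xs.length = n + 1) :
    PySem.List.pyGetD xs (-1) 0 = PySem.List.pyGetD xs (n : Int) 0 := by
  have h1 : PySem.List.pyGetD xs (-1) 0 = (PySem.List.pyGet? xs (-1)).getD 0 := rfl
  rw [h1, PySem.List.pyGet?_neg_one, List.getLast?_eq_getElem?, hx,
    PySem.List.pyGetD_of_nonneg _ _ (by omega)]
  simp [List.getD_eq_getElem?_getD]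

-- ===== VERDICT (by name: the statement is the Claim_ definition above) =====
theorem countDistinctSubsequences_spec : Claim_equal_countDistinctSubsequences := by
  intro s _
  show countDistinctSubsequences s = countDistinctSubsequences_alt s
  show PySem.List.pyGetD
      (List.foldl pvStepA
        (PySem.Dict.empty, PySem.List.pySetD (List.replicate (s.toList.length + 1) (0 : Int)) 0 1)
        (PySem.List.enumerate s.toList 1)).2 (-1) 0 - 1 =
    PySem.Int.mod ((List.foldl pvStepB PySem.Dict.empty s.toList).values.sum + 1) 1000000007 - 1
  have hlen0 : (PySem.List.pySetD (List.replicate (s.toList.length + 1) (0 : Int)) 0 1).length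
      = s.toList.length + 1 := by
    rw [PySem.List.length_pySetD, List.length_replicate]
  obtain ⟨hL, hV⟩ := pv_loop s.toList 0
    (PySem.List.pySetD (List.replicate (s.toList.length + 1) (0 : Int)) 0 1)
    PySem.Dict.empty PySem.Dict.empty
    (by rw [hlen0]; omega)
    (by
      rw [PySem.List.pySetD_of_nonneg _ _ (by omega),
        PySem.List.pyGetD_of_nonneg _ _ (by omega)]
      have : ((0 : Nat) : Int).toNat = 0 := by omega
      rw [this, show ((0:Int)).toNat = 0 by omega,
        pv_getD_set_self _ _ _ (by rw [List.length_replicate]; omega)]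
      rw [PySem.Int.mod_eq_emod_of_pos (by norm_num)]
      norm_num [show (PySem.Dict.empty : PySem.Dict Char Int).values = [] from rfl])
    (fun c hc => by rw [PySem.Dict.contains_empty] at hc; cases hc)
    (fun c => by rw [PySem.Dict.getD_empty, PySem.Dict.contains_empty]; simp)
    (by simp [PySem.Dict.keys_empty])
  simp only [Nat.cast_zero, zero_add] at hL hV
  rw [hlen0] at hL
  rw [pv_pyGetD_neg_one _ _ hL, hV]
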